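-- pv_equiv track=rewrite | github.com/d-ylee/spellbook | multithreaded-work.py | get_file_queues
-- ===== SOURCE A (Python) =====
-- def get_file_queues(num_threads, f):
--     # Splits the list of files into (almost) equal buckets of work per thread
--     queues = [ [] for i in range(num_threads) ]
--     i = 0
--     for filename in f:
--         which_queue = i % num_threads
--         queues[which_queue].append(filename.strip())
--         i += 1
--     return queues
-- ===== SOURCE B (Python) =====
-- def get_file_queues(num_threads, f):
--     # Splits the list of files into (almost) equal buckets of work per thread:
--     # bucket j gets every num_threads-th stripped line starting at offset j.
--     lines = [line.strip() for line in f]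
--     return [[lines[k] for k in range(j, len(lines), num_threads)]
--             for j in range(num_threads)]
-- ===== Notes on version B (the rewrite author's own statement) =====
-- stated objective: alternative
-- what changed: Replaces A's single round-robin loop with a modular counter appending into mutable buckets by building each of the num_threads buckets directly as a strided index-comprehension lines[j], lines[j+n], ... over the pre-stripped line list.
import Mathlib
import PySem

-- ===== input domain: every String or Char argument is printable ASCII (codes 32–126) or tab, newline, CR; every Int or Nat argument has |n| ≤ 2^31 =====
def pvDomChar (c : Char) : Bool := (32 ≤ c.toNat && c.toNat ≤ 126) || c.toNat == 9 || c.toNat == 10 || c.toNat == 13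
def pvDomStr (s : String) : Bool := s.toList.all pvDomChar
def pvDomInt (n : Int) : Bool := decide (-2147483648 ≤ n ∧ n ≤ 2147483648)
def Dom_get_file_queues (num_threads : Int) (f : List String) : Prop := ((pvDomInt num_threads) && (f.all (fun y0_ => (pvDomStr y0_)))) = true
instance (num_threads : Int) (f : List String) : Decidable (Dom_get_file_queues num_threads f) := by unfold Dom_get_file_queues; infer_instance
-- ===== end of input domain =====

-- B replaces A's single round-robin loop with a modular counter by num_threads strided
-- index-comprehensions, one per bucket (objective: alternative decomposition, same cost).

-- ===== PORT A =====
-- Loop body of A; the Option component models Python raising (i % 0 → ZeroDivisionError,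
-- queues[which_queue] out of range → IndexError): none = already raised.
def pvStepA (num_threads : Int) (st : Option (List (List String)) × Int) (filename : String) :
    Option (List (List String)) × Int :=
  match st.1 with
  | none => (none, st.2 + 1)
  | some qs =>
    match PySem.Int.mod? st.2 num_threads with
    | none => (none, st.2 + 1)
    | some which_queue =>
      match PySem.List.pyGet? qs which_queue with
      | none => (none, st.2 + 1)
      | some q =>
        (some (PySem.List.pySetD qs which_queue (q ++ [PySem.Str.strip filename])), st.2 + 1)

def get_file_queues (num_threads : Int) (f : List String) : List (List String) :=
  let queues : List (List String) := (PySem.List.pyRange 0 num_threads 1).map (fun _ => [])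
  let fin := f.foldl (pvStepA num_threads) (some queues, 0)
  fin.1.getD []

-- ===== PORT B =====
def get_file_queues_alt (num_threads : Int) (f : List String) : List (List String) :=
  let lines := f.map (fun line => PySem.Str.strip line)
  (PySem.List.pyRange 0 num_threads 1).map (fun j =>
    (PySem.List.pyRange j (lines.length : Int) num_threads).map
      (fun k => PySem.List.pyGetD lines k ""))

-- ===== PRECONDITION & SPEC =====
-- Pre_ excludes exactly the inputs on which A raises: num_threads ≤ 0 with a non-empty f
-- (ZeroDivisionError for num_threads = 0, IndexError for num_threads < 0).
def Pre_get_file_queues (num_threads : Int) (f : List String) : Prop :=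
  1 ≤ num_threads ∨ f = []
instance (num_threads : Int) (f : List String) : Decidable (Pre_get_file_queues num_threads f) := by
  unfold Pre_get_file_queues; infer_instance

def pvWitness_get_file_queues : Int × List String := (2, ["a", " b ", "c", "d\t"])

def Spec_get_file_queues (num_threads : Int) (f : List String) (out : List (List String)) : Prop :=
  out = get_file_queues_alt num_threads f
instance (num_threads : Int) (f : List String) (out : List (List String)) : Decidable (Spec_get_file_queues num_threads f out) := by
  unfold Spec_get_file_queues; infer_instance

-- ===== CLAIM (what is proved, stated in full; the proofs are below) =====
def Claim_equal_get_file_queues : Prop := ∀ (num_threads : Int) (f : List String), Dom_get_file_queues num_threads f → Pre_get_file_queues num_threads f → Spec_get_file_queues num_threads f (get_file_queues num_threads f)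

-- ===== LEMMAS AND PROOFS =====

-- x % n for x < 2n, spelled as a disjunction of linear facts so that omega can use it.
theorem pvModSmall (a n : Nat) (h : a < 2 * n) :
    (n ≤ a ∧ a % n = a - n) ∨ (a < n ∧ a % n = a) := by
  by_cases hna : n ≤ a
  · exact Or.inl ⟨hna, by rw [Nat.mod_eq_sub_mod hna, Nat.mod_eq_of_lt (by omega)]⟩
  · exact Or.inr ⟨by omega, Nat.mod_eq_of_lt (by omega)⟩

-- every n-th element of a list, starting with its head
def pvStride {α : Type} (n : Nat) : List α → List α
  | [] => []
  | x :: xs => x :: pvStride n (xs.drop (n - 1))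
termination_by l => l.length
decreasing_by simp [List.length_drop]

theorem pvStride_nil {α : Type} (n : Nat) : pvStride n ([] : List α) = [] := by
  rw [pvStride.eq_def]

theorem pvStride_cons {α : Type} (n : Nat) (x : α) (xs : List α) :
    pvStride n (x :: xs) = x :: pvStride n (xs.drop (n - 1)) := by
  rw [pvStride.eq_def]

-- the elements of l whose (zipIdx-)index is ≡ j (mod n), as a stride
theorem pvZipFilter {α : Type} (n j : Nat) (hn : 0 < n) (hj : j < n) :
    ∀ (l : List α) (c : Nat),
      ((l.zipIdx c).filter (fun p => decide (p.2 % n = j))).map Prod.fst =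
        pvStride n (l.drop ((j + n - c % n) % n)) := by
  intro l
  induction l with
  | nil => intro c; simp [pvStride_nil]
  | cons x xs ih =>
    intro c
    have hw : c % n < n := Nat.mod_lt _ hn
    have hw1 : (c + 1) % n < n := Nat.mod_lt _ hn
    have e1 : (c + 1) % n = (c % n + 1 % n) % n := Nat.add_mod c 1 n
    have e3 := pvModSmall 1 n (by omega)
    have e2 := pvModSmall (c % n + 1 % n) n (by omega)
    have e4 := pvModSmall (j + n - c % n) n (by omega)
    have e5 := pvModSmall (j + n - (c + 1) % n) n (by omega)
    by_cases hcj : c % n = j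
    · have hoff : (j + n - c % n) % n = 0 := by omega
      have hoff' : (j + n - (c + 1) % n) % n = n - 1 := by omega
      rw [hoff, List.drop_zero, pvStride_cons]
      simp only [List.zipIdx_cons, List.filter_cons, hcj, decide_true, if_true, List.map_cons]
      rw [ih (c + 1), hoff']
    · have hpos : 1 ≤ (j + n - c % n) % n := by omega
      have hoff' : (j + n - (c + 1) % n) % n = (j + n - c % n) % n - 1 := by omega
      obtain ⟨k, hk⟩ : ∃ k, (j + n - c % n) % n = k + 1 :=
        ⟨_, (Nat.succ_pred_eq_of_pos hpos).symm⟩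
      rw [hk, List.drop_succ_cons]
      simp only [List.zipIdx_cons, List.filter_cons, decide_eq_true_eq, if_neg hcj]
      rw [ih (c + 1), hoff', hk]
      simp only [Nat.add_sub_cancel]

-- range(a, b, s) for positive s starts at a
theorem pvRangeCons (a b s : Int) (hs : 0 < s) (hab : a < b) :
    PySem.List.pyRange a b s = a :: PySem.List.pyRange (a + s) b s := by
  rw [PySem.List.pyRange_of_pos _ _ hs, PySem.List.pyRange_of_pos _ _ hs]
  have hc1 : (b - a + s - 1) / s = (b - a - 1) / s + 1 := by
    have h := Int.add_mul_ediv_right (b - a - 1) 1 (by omega : s ≠ 0)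
    rw [one_mul] at h
    rw [show b - a + s - 1 = b - a - 1 + s by ring, h]
  have hnn : 0 ≤ (b - a - 1) / s := Int.ediv_nonneg (by omega) (by omega)
  by_cases h2 : a + s < b
  · rw [if_pos hab, if_pos h2]
    rw [show b - (a + s) + s - 1 = b - a - 1 by ring]
    rw [hc1]
    rw [show ((b - a - 1) / s + 1).toNat = ((b - a - 1) / s).toNat + 1 by omega]
    rw [List.range_succ_eq_map]
    simp only [List.map_cons, Nat.cast_zero, mul_zero, add_zero, List.map_map]
    congr 1
    apply List.map_congr_left
    intro k _
    simp only [Function.comp_apply]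
    push_cast
    ring
  · rw [if_pos hab, if_neg h2]
    have hz : (b - a - 1) / s = 0 :=
      Int.ediv_eq_zero_of_lt (by omega) (by omega)
    rw [hc1, hz]
    simp
  -- counts: list(range(a,b,s)) has ((b-a+s-1)/s) elements, the tail one fewer

theorem pvRangeStrideBase {α : Type} (n : Nat) (hn : 0 < n) (d : α)
    (l : List α) (j : Nat) (hle : l.length ≤ j) :
    (PySem.List.pyRange (j : Int) (l.length : Int) (n : Int)).map
        (fun k => PySem.List.pyGetD l k d) = pvStride n (l.drop j) := by
  rw [PySem.List.pyRange_of_pos _ _ (by omega : (0:Int) < (n:Int))]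
  rw [if_neg (by omega : ¬((j : Int) < (l.length : Int)))]
  rw [List.drop_eq_nil_of_le hle]
  simp [pvStride_nil]

theorem pvRangeStrideAux {α : Type} (n : Nat) (hn : 0 < n) (d : α) :
    ∀ (m : Nat) (l : List α) (j : Nat), l.length - j ≤ m →
      (PySem.List.pyRange (j : Int) (l.length : Int) (n : Int)).map
          (fun k => PySem.List.pyGetD l k d) = pvStride n (l.drop j) := by
  intro m
  induction m with
  | zero => intro l j h; exact pvRangeStrideBase n hn d l j (by omega)
  | succ m ih =>
    intro l j h
    by_cases hlt : j < l.length
    · rw [pvRangeCons _ _ _ (by omega) (by omega)]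
      rw [List.map_cons]
      rw [show ((j : Int) + (n : Int)) = ((j + n : Nat) : Int) by push_cast; ring]
      rw [ih l (j + n) (by omega)]
      rw [PySem.List.pyGetD_natCast]
      rw [← List.getElem_cons_drop (show j < l.length from hlt)]
      rw [pvStride_cons, List.drop_drop]
      rw [List.getD_eq_getElem l d hlt, show j + 1 + (n - 1) = j + n from by omega]
    · exact pvRangeStrideBase n hn d l j (by omega)

theorem pvRangeStride {α : Type} (n : Nat) (hn : 0 < n) (d : α) (l : List α) (j : Nat) :
    (PySem.List.pyRange (j : Int) (l.length : Int) (n : Int)).map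
        (fun k => PySem.List.pyGetD l k d) = pvStride n (l.drop j) :=
  pvRangeStrideAux n hn d (l.length) l j (by omega)

theorem pvMapGetDRange (l : List (List String)) :
    (List.range l.length).map (fun j => l.getD j []) = l := by
  apply List.ext_getElem (by simp)
  intro i h1 h2
  simp only [List.getElem_map, List.getElem_range]
  exact List.getD_eq_getElem l [] h2

theorem pvGetDSetNe (qs : List (List String)) (w j : Nat) (v : List String)
    (hj : j < qs.length) (hne : w ≠ j) :
    (qs.set w v).getD j [] = qs.getD j [] := by
  rw [List.getD_eq_getElem _ _ (by simpa using hj), List.getD_eq_getElem qs [] hj,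
    List.getElem_set_ne hne]

theorem pvGetDConstNil {α : Type} (L : List α) (j : Nat) :
    (L.map (fun _ => ([] : List String))).getD j [] = [] := by
  rw [List.getD_eq_getElem?_getD, List.getElem?_map]
  cases L[j]? <;> simp

-- invariant of A's fold: bucket j collects the stripped elements whose counter is ≡ j (mod n)
theorem pvAfold (nt : Int) (n : Nat) (hn : 0 < n) (hnt : nt = (n : Int)) :
    ∀ (l : List String) (c : Nat) (qs : List (List String)), qs.length = n →
      l.foldl (pvStepA nt) (some qs, (c : Int)) =
        (some ((List.range n).map (fun j =>
            qs.getD j [] ++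
              (((l.map PySem.Str.strip).zipIdx c).filter
                  (fun p => decide (p.2 % n = j))).map Prod.fst)),
          ((c + l.length : Nat) : Int)) := by
  subst hnt
  intro l
  induction l with
  | nil =>
    intro c qs hq
    simp only [List.foldl_nil, List.map_nil, List.zipIdx_nil, List.filter_nil,
      List.length_nil, Nat.add_zero, List.append_nil]
    rw [← hq, pvMapGetDRange]
  | cons x l ih =>
    intro c qs hq
    have hw : c % n < n := Nat.mod_lt _ hn
    have hmod : PySem.Int.mod? (c : Int) (n : Int) = some ((c % n : Nat) : Int) := by
      simp only [PySem.Int.mod?, if_neg (by omega : ¬((n : Int) = 0))]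
      exact congrArg some (PySem.Int.mod_natCast c n)
    have hget : PySem.List.pyGet? qs ((c % n : Nat) : Int) = some (qs.getD (c % n) []) := by
      rw [PySem.List.pyGet?_natCast, List.getElem?_eq_getElem (by omega : c % n < qs.length),
        List.getD_eq_getElem qs [] (by omega)]
    have hstep : pvStepA (n : Int) (some qs, (c : Int)) x =
        (some (qs.set (c % n) (qs.getD (c % n) [] ++ [PySem.Str.strip x])),
          ((c + 1 : Nat) : Int)) := by
      simp only [pvStepA, hmod, hget, PySem.List.pySetD_natCast]
      constructor
    rw [List.foldl_cons, hstep, ih (c + 1) _ (by simp [hq])]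
    refine Prod.ext ?_ (by simp only [List.length_cons]; push_cast; ring)
    simp only
    congr 1
    apply List.map_congr_left
    intro j hj
    have hjn : j < n := List.mem_range.mp hj
    simp only [List.map_cons, List.zipIdx_cons, List.filter_cons]
    by_cases hcj : c % n = j
    · rw [← hcj]
      have hset : (qs.set (c % n) (qs.getD (c % n) [] ++ [PySem.Str.strip x])).getD (c % n) []
          = qs.getD (c % n) [] ++ [PySem.Str.strip x] := by
        rw [List.getD_eq_getElem _ _ (by simpa [hq] using hw)]
        simp
      rw [hset]
      simp [List.append_assoc]
    · rw [pvGetDSetNe qs (c % n) j _ (by omega) hcj]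
      simp [hcj]

-- ===== VERDICT (by name: the statement is the Claim_ definition above) =====
theorem get_file_queues_spec : Claim_equal_get_file_queues := by
  intro nt f _ hpre
  simp only [Spec_get_file_queues, get_file_queues, get_file_queues_alt]
  by_cases h1 : 1 ≤ nt
  · have hn0 : 0 < nt.toNat := by omega
    have hnt : nt = (nt.toNat : Int) := by omega
    have hq : ((PySem.List.pyRange 0 nt 1).map (fun _ => ([] : List String))).length
        = nt.toNat := by
      simp [PySem.List.length_pyRange_one]
    have hA := pvAfold nt nt.toNat hn0 hnt f 0 _ hq
    simp only [Nat.cast_zero] at hA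
    rw [hA]
    simp only [Option.getD_some]
    have heta : (fun line => PySem.Str.strip line) = PySem.Str.strip := rfl
    rw [PySem.List.pyRange_one 0 nt]
    simp only [Int.sub_zero, List.map_map, heta]
    apply List.map_congr_left
    intro j hj
    have hjn : j < nt.toNat := List.mem_range.mp hj
    simp only [Function.comp_def, zero_add]
    rw [pvGetDConstNil, List.nil_append]
    rw [pvZipFilter nt.toNat j hn0 hjn (f.map PySem.Str.strip) 0]
    simp only [Nat.zero_mod, Nat.sub_zero, Nat.add_mod_right, Nat.mod_eq_of_lt hjn]
    have hR := pvRangeStride nt.toNat hn0 "" (f.map PySem.Str.strip) j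
    rw [← hnt] at hR
    rw [hR]
  · have hf : f = [] := hpre.resolve_left h1
    subst hf
    have he : PySem.List.pyRange 0 nt 1 = [] := PySem.List.pyRange_one_eq_nil (by omega)
    simp [he]
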